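-- pv_equiv track=rewrite | github.com/Bilouu93/Ei_impact | modele_mat_rapide.py | indice_max_inferieur
-- ===== SOURCE A (Python) =====
-- def indice_max_inferieur(n, L):
--     gauche, droite = 0, len(L) - 1
--     indice = -1
--     while gauche <= droite:
--         milieu = (gauche + droite) // 2
--
--         if L[milieu] < n:
--             indice = milieu
--             gauche = milieu + 1
--         else:
--             droite = milieu - 1
--     return indice
-- ===== SOURCE B (Python) =====
-- def indice_max_inferieur(n, L):
--     # Accumulator-free bisection on the half-open range [lo, hi): the loop's
--     # invariant "indice == gauche - 1" makes A's accumulator redundant, so we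
--     # just locate the insertion point recursively and subtract one.
--     def bisect(lo, hi):
--         if lo >= hi:
--             return lo
--         mid = (lo + hi - 1) // 2
--         if L[mid] < n:
--             return bisect(mid + 1, hi)
--         return bisect(lo, mid)
--     return bisect(0, len(L)) - 1
-- ===== Notes on version B (the rewrite author's own statement) =====
-- stated objective: simpler
-- what changed: Drops A's accumulator variable entirely: since A's loop maintains the invariant indice = gauche - 1, B recursively bisects the half-open range [lo, hi) with no accumulator and returns the final insertion point minus one, making the same midpoint comparisons so it matches A exactly even on unsorted input.
import Mathlib
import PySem

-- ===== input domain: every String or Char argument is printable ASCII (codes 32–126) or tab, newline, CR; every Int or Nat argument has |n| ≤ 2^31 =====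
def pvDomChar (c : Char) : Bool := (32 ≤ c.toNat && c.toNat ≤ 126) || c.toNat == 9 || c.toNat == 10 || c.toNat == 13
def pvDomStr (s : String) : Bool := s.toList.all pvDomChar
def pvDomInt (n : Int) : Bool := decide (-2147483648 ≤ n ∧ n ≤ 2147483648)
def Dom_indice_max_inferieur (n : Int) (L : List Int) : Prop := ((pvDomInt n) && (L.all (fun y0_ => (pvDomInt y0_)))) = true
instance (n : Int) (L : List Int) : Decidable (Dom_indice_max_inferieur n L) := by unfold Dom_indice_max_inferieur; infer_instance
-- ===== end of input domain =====

-- B drops A's accumulator `indice` entirely: since A maintains the invariant indice = gauche - 1,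
-- B recursively bisects the half-open range [lo, hi) and returns the insertion point minus one (alternative).

-- ===== PORT A =====
-- A's while-loop: state (gauche, droite, indice); closed interval, accumulator
def pvLoopA (n : Int) (L : List Int) (gauche droite indice : Int) : Int :=
  if _h : gauche ≤ droite then
    let milieu := PySem.Int.floordiv (gauche + droite) 2
    match PySem.List.pyGet? L milieu with
    | none => indice   -- unreachable: milieu is always in range (IndexError never occurs)
    | some v =>
      if v < n then pvLoopA n L (milieu + 1) droite milieu
      else pvLoopA n L gauche (milieu - 1) indice
  else indice
termination_by (droite - gauche + 1).toNat
decreasing_by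
  · have := PySem.Int.floordiv_two_mid_bounds _h; omega
  · have := PySem.Int.floordiv_two_mid_bounds _h; omega

def indice_max_inferieur (n : Int) (L : List Int) : Int :=
  pvLoopA n L 0 ((L.length : Int) - 1) (-1)

-- ===== PORT B =====
-- Source B's inner bisect(lo, hi): half-open range, no accumulator
def pvBisect (n : Int) (L : List Int) (lo hi : Int) : Int :=
  if _h : lo ≥ hi then lo
  else
    let mid := PySem.Int.floordiv (lo + hi - 1) 2
    match PySem.List.pyGet? L mid with
    | none => lo   -- unreachable: mid is always in range
    | some v =>
      if v < n then pvBisect n L (mid + 1) hi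
      else pvBisect n L lo mid
termination_by (hi - lo).toNat
decreasing_by
  · have h1 := PySem.Int.floordiv_two_mid_bounds (by omega : lo ≤ hi - 1)
    have e : lo + (hi - 1) = lo + hi - 1 := by ring
    rw [e] at h1; omega
  · have h1 := PySem.Int.floordiv_two_mid_bounds (by omega : lo ≤ hi - 1)
    have e : lo + (hi - 1) = lo + hi - 1 := by ring
    rw [e] at h1; omega

def indice_max_inferieur_alt (n : Int) (L : List Int) : Int :=
  pvBisect n L 0 (L.length : Int) - 1

-- ===== PRECONDITION & SPEC =====
def Spec_indice_max_inferieur (n : Int) (L : List Int) (out : Int) : Prop := out = indice_max_inferieur_alt n L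
instance (n : Int) (L : List Int) (out : Int) : Decidable (Spec_indice_max_inferieur n L out) := by unfold Spec_indice_max_inferieur; infer_instance

-- ===== CLAIM (what is proved, stated in full; the proofs are below) =====
def Claim_equal_indice_max_inferieur : Prop := ∀ (n : Int) (L : List Int), Dom_indice_max_inferieur n L → Spec_indice_max_inferieur n L (indice_max_inferieur n L)

-- ===== LEMMAS AND PROOFS =====
-- A's loop invariant is indice = gauche - 1; under it the loop computes B's insertion point minus one.
theorem pvLoop_eq_bisect (n : Int) (L : List Int) :
    ∀ (k : Nat) (g d : Int), (d - g + 1).toNat ≤ k →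
      pvLoopA n L g d (g - 1) = pvBisect n L g (d + 1) - 1 := by
  intro k
  induction k with
  | zero =>
    intro g d hk
    have hgd : ¬ g ≤ d := by omega
    rw [pvLoopA, pvBisect]
    simp [hgd, show g ≥ d + 1 by omega]
  | succ k ih =>
    intro g d hk
    by_cases hgd : g ≤ d
    · have hmid := PySem.Int.floordiv_two_mid_bounds hgd
      rw [pvLoopA, pvBisect]
      simp only [hgd, dite_true, show ¬ g ≥ d + 1 by omega, dite_false]
      have hm : PySem.Int.floordiv (g + (d + 1) - 1) 2 = PySem.Int.floordiv (g + d) 2 := by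
        have e : g + (d + 1) - 1 = g + d := by ring
        rw [e]
      rw [hm]
      set m := PySem.Int.floordiv (g + d) 2 with hmdef
      cases hv : PySem.List.pyGet? L m with
      | none => simp
      | some v =>
        simp only
        by_cases hvn : v < n
        · simp only [hvn, if_true]
          have := ih (m + 1) d (by omega)
          simpa using this
        · simp only [hvn, if_false]
          have := ih g (m - 1) (by omega)
          simpa using this
    · rw [pvLoopA, pvBisect]
      simp [hgd, show g ≥ d + 1 by omega]

-- ===== VERDICT (by name: the statement is the Claim_ definition above) =====
theorem indice_max_inferieur_spec : Claim_equal_indice_max_inferieur := by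
  intro n L _hd
  unfold Spec_indice_max_inferieur indice_max_inferieur indice_max_inferieur_alt
  have := pvLoop_eq_bisect n L ((L.length : Int) - 0 + 1).toNat 0 ((L.length : Int) - 1) (by omega)
  simpa using this
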